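-- pv_equiv track=rewrite | github.com/SimonStaudinger/ICEIS_Perturbation_Tool | functions/perturbation_algorithms.py | perturbInOrder
-- ===== SOURCE A (Python) =====
-- def perturbInOrder(steps, value, values):
--     perturbedList = list()
--     size = len(values)
--
--     ind = values.index(value)
--     for i in range(1, steps + 1):
--         if ind - i >= 0:
--             perturbedList.append(values[ind - i])
--
--     for i in range(1, steps + 1):
--         if ind + i < size:
--             perturbedList.append(values[ind + i])
--
--     return perturbedList
-- ===== SOURCE B (Python) =====
-- def perturbInOrder(steps, value, values):
--     ind = values.index(value)
--     k = max(0, steps)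
--     left = values[max(0, ind - k):ind][::-1]
--     right = values[ind + 1:ind + 1 + k]
--     return left + right
-- ===== Notes on version B (the rewrite author's own statement) =====
-- stated objective: simpler
-- what changed: A's two index-guarded counting loops over range(1, steps+1) are replaced by bound arithmetic plus two slices: the left neighbours as a reversed slice values[max(0, ind-k):ind][::-1] and the right neighbours as a clamped slice values[ind+1:ind+1+k].
import Mathlib
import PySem

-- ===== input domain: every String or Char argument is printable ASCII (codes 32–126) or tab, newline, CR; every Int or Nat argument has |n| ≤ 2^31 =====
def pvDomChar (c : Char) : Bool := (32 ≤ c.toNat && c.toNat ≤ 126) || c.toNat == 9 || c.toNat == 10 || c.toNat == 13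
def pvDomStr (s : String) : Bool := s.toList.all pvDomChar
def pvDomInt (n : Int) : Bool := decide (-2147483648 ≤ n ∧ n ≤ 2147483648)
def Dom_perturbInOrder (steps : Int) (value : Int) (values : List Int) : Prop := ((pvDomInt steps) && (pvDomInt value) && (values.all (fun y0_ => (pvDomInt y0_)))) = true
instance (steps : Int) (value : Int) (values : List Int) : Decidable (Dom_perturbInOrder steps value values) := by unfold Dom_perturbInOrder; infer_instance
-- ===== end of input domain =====

-- B replaces A's two index-guarded counting loops by bound arithmetic and two slices
-- (left neighbours as a reversed slice, right neighbours as a clamped slice); objective: simpler.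

-- ===== PORT A =====
def perturbInOrder (steps : Int) (value : Int) (values : List Int) : List Int :=
  match PySem.List.index? values value with
  | none => []   -- unreachable under Pre_ (Python raises ValueError here)
  | some ind =>
    let size : Int := values.length
    let l1 := (PySem.List.pyRange 1 (steps + 1) 1).foldl
      (fun acc i => if (ind : Int) - i ≥ 0 then acc ++ [PySem.List.pyGetD values ((ind : Int) - i) 0] else acc) []
    (PySem.List.pyRange 1 (steps + 1) 1).foldl
      (fun acc i => if (ind : Int) + i < size then acc ++ [PySem.List.pyGetD values ((ind : Int) + i) 0] else acc) l1

-- ===== PORT B =====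
def perturbInOrder_alt (steps : Int) (value : Int) (values : List Int) : List Int :=
  match PySem.List.index? values value with
  | none => []   -- unreachable under Pre_ (Python raises ValueError here)
  | some ind =>
    let k : Int := max 0 steps
    -- values[max(0, ind-k):ind][::-1]  ([::-1] = reverse, cf. PySem.List.slice?_none_none_neg_one)
    let left := (PySem.List.slice values (some (max 0 ((ind : Int) - k))) (some (ind : Int))).reverse
    let right := PySem.List.slice values (some ((ind : Int) + 1)) (some ((ind : Int) + 1 + k))
    left ++ right

-- ===== PRECONDITION & SPEC =====
-- Pre_ excludes exactly the inputs where `values.index(value)` raises ValueError (value not in the list).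
def Pre_perturbInOrder (steps : Int) (value : Int) (values : List Int) : Prop := value ∈ values
instance (steps : Int) (value : Int) (values : List Int) : Decidable (Pre_perturbInOrder steps value values) := by unfold Pre_perturbInOrder; infer_instance
def pvWitness_perturbInOrder : Int × Int × List Int := (2, 5, [1, 5, 7, 9])

def Spec_perturbInOrder (steps : Int) (value : Int) (values : List Int) (out : List Int) : Prop := out = perturbInOrder_alt steps value values
instance (steps : Int) (value : Int) (values : List Int) (out : List Int) : Decidable (Spec_perturbInOrder steps value values out) := by unfold Spec_perturbInOrder; infer_instance

-- ===== CLAIM (what is proved, stated in full; the proofs are below) =====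
def Claim_equal_perturbInOrder : Prop := ∀ (steps : Int) (value : Int) (values : List Int), Dom_perturbInOrder steps value values → Pre_perturbInOrder steps value values → Spec_perturbInOrder steps value values (perturbInOrder steps value values)

-- ===== LEMMAS AND PROOFS =====

theorem filter_lt_range (s t : Nat) :
    (List.range s).filter (fun j => decide (j < t)) = List.range (min s t) := by
  induction s with
  | zero => simp
  | succ n ih =>
    rw [List.range_succ, List.filter_append, ih]
    by_cases h : n < t
    · have hm : min n t = n := by omega
      simp [h, hm, List.range_succ]
    · have h2 : min (n+1) t = min n t := by omega
      simp [h, h2]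

-- A's left loop, as a filtered range, equals the reversed left slice.
theorem left_map_eq (values : List Int) (ind m : Nat) (hm : m ≤ ind) (hlt : ind < values.length) :
    (List.range m).map (fun (j : Nat) => PySem.List.pyGetD values ((ind : Int) - (1 + (j : Int))) 0)
    = ((values.drop (ind - m)).take m).reverse := by
  have hlen : ((values.drop (ind - m)).take m).length = m := by simp; omega
  apply List.ext_getElem
  · simpa using hlen.symm
  · intro p hp hq
    have hpm : p < m := by simpa using hp
    rw [List.getElem_map, List.getElem_range, List.getElem_reverse,
      PySem.List.pyGetD_eq_getElem values 0 (by omega) (by omega),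
      List.getElem_take, List.getElem_drop]
    congr 1
    simp [hlen]
    omega

-- A's right loop, as a filtered range, equals the right slice.
theorem right_map_eq (values : List Int) (ind m : Nat) (hle : ind + 1 ≤ values.length)
    (hm : m ≤ values.length - ind - 1) :
    (List.range m).map (fun (j : Nat) => PySem.List.pyGetD values ((ind : Int) + (1 + (j : Int))) 0)
    = (values.drop (ind + 1)).take m := by
  apply List.ext_getElem
  · simp; omega
  · intro p hp hq
    have hpm : p < m := by simpa using hp
    rw [List.getElem_map, List.getElem_range,
      PySem.List.pyGetD_eq_getElem values 0 (by omega) (by omega),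
      List.getElem_take, List.getElem_drop]
    congr 1
    omega

theorem perturb_main (steps : Int) (value : Int) (values : List Int)
    (hmem : value ∈ values) :
    perturbInOrder steps value values = perturbInOrder_alt steps value values := by
  obtain ⟨ind, hidx⟩ := Option.isSome_iff_exists.mp ((PySem.List.index?_isSome_iff values value).mpr hmem)
  obtain ⟨hlt, -, -⟩ := PySem.List.getElem_of_index?_eq_some hidx
  rw [perturbInOrder, perturbInOrder_alt, hidx]
  simp only
  rw [PySem.List.foldl_append_ite, PySem.List.foldl_append_ite, List.nil_append]
  by_cases hpos : 0 < steps
  · -- the counting loops run for i = 1 .. steps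
    have hk : max 0 steps = steps := by omega
    have htn : ((steps + 1) - 1).toNat = steps.toNat := by omega
    rw [hk, PySem.List.pyRange_one, htn, List.filter_map, List.filter_map,
      List.map_map, List.map_map,
      List.filter_congr (q := fun j => decide (j < ind))
        (by intro j _; simp only [Function.comp, decide_eq_decide]; omega)]
    rw [List.filter_congr (p := (fun x => decide ((ind : Int) + x < (values.length : Int))) ∘ fun (k : Nat) => 1 + (k : Int))
        (q := fun j => decide (j < values.length - ind - 1))
        (by intro j _; simp only [Function.comp, decide_eq_decide]; omega)]
    rw [filter_lt_range, filter_lt_range]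
    have hL := left_map_eq values ind (min steps.toNat ind) (by omega) hlt
    have hR := right_map_eq values ind (min steps.toNat (values.length - ind - 1)) (by omega) (by omega)
    simp only [Function.comp_def] at hL hR ⊢
    rw [hL, hR]
    -- B's two slices
    have hstart : max 0 ((ind : Int) - steps) = ((ind - min steps.toNat ind : Nat) : Int) := by omega
    rw [hstart, PySem.List.slice_natCast,
      PySem.List.slice_toNat values (by omega) (by omega)]
    have h1 : ind - (ind - min steps.toNat ind) = min steps.toNat ind := by omega
    have h2 : ((ind : Int) + 1).toNat = ind + 1 := by omega
    have h3 : ((ind : Int) + 1 + steps).toNat - (ind + 1) = steps.toNat := by omega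
    rw [h1, h2, h3]
    congr 1
    -- take steps.toNat clamps to the list length
    have hlen : (values.drop (ind + 1)).length = values.length - ind - 1 := by simp; omega
    conv_rhs => rw [List.take_eq_take_min]
    rw [hlen]
  · -- steps ≤ 0: both loops and both slices are empty
    have hr : PySem.List.pyRange 1 (steps + 1) 1 = [] := PySem.List.pyRange_one_eq_nil (by omega)
    have hk : max 0 steps = 0 := by omega
    have hstart : max 0 ((ind : Int) - 0) = ((ind : Nat) : Int) := by omega
    rw [hr, hk, hstart, PySem.List.slice_natCast]
    have h2 : ((ind : Int) + 1).toNat = ind + 1 := by omega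
    rw [PySem.List.slice_toNat values (by omega) (by omega), h2]
    simp

-- ===== VERDICT (by name: the statement is the Claim_ definition above) =====
theorem perturbInOrder_spec : Claim_equal_perturbInOrder := by
  intro steps value values _ hpre
  exact perturb_main steps value values hpre
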